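-- pv_equiv track=rewrite | github.com/JungChangwoo/Algorithm_PS | Programmers/Hash/BestAlbum.py | solution
-- ===== SOURCE A (Python) =====
-- from collections import defaultdict
--
-- def solution(genres, plays):
--     list_dict, count_dict = defaultdict(list),  defaultdict(int)
--     for i in range(len(genres)):
--         genre, play = genres[i], plays[i]
--         list_dict[genre].append((play, i))
--         count_dict[genre] += play
--
--     count_dict = sorted(list(count_dict.items()), key = lambda x: x[1], reverse = True)
--     for genre, play in list_dict.items():
--         list_dict[genre] = sorted(play, key = lambda x: (x[0], -x[1]), reverse = True)
--
--     result = []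
--     for genre, play in count_dict:
--         temp = list_dict[genre]
--         if len(temp) == 1:
--             result.append(temp[0][1])
--         else:
--             for i in range(2):
--                 result.append(temp[i][1])
--     return result
-- ===== SOURCE B (Python) =====
-- def solution(genres, plays):
--     # one pass: per genre keep (running total, best (play, idx), second-best or None)
--     info = {}
--     for i, (g, p) in enumerate(zip(genres, plays)):
--         cur = info.get(g)
--         if cur is None:
--             info[g] = (p, (p, i), None)
--         else:
--             t, b1, b2 = cur
--             if b1[0] < p:
--                 info[g] = (t + p, (p, i), b1)
--             elif b2 is None or b2[0] < p:
--                 info[g] = (t + p, b1, (p, i))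
--             else:
--                 info[g] = (t + p, b1, b2)
--     result = []
--     for g, (t, b1, b2) in sorted(info.items(), key=lambda kv: kv[1][0], reverse=True):
--         result.append(b1[1])
--         if b2 is not None:
--             result.append(b2[1])
--     return result
-- ===== Notes on version B (the rewrite author's own statement) =====
-- stated objective: faster
-- what changed: B replaces A's per-genre full sorts and its index-range grouping loop with a single enumerate-zip pass that maintains each genre's running total and top-two songs, so only the per-genre summaries get sorted.
import Mathlib
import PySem

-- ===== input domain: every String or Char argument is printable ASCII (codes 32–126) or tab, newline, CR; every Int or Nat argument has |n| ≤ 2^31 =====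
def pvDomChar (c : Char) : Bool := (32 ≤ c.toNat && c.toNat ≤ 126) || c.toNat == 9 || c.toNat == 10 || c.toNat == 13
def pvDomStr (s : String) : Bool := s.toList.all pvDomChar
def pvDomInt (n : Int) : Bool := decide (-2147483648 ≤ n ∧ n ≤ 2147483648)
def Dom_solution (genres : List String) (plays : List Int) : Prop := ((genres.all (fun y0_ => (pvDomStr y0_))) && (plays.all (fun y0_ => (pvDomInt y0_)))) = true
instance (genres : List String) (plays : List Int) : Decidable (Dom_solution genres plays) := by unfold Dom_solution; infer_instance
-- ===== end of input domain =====

-- B replaces A's per-genre full sorts with a one-pass top-2/total scan; only the per-genre summaries get sorted.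

-- ===== PORT A =====
def solution (genres : List String) (plays : List Int) : List Int :=
  let dicts := (PySem.List.pyRange 0 (genres.length : Int) 1).foldl
    (fun (s : PySem.Dict String (List (Int × Int)) × PySem.Dict String Int) i =>
      let genre := PySem.List.pyGetD genres i ""
      let play := PySem.List.pyGetD plays i 0
      (s.1.modify genre [] (fun l => l ++ [(play, i)]), s.2.modify genre 0 (fun c => c + play)))
    (PySem.Dict.empty, PySem.Dict.empty)
  let countSorted := PySem.List.sorted dicts.2.items (fun p => p.2) true
  let listDict2 := dicts.1.items.foldl
    (fun d p => d.insert p.1 (PySem.List.sorted2 p.2 (fun x => x.1) (fun x => -x.2) true)) dicts.1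
  countSorted.foldl
    (fun result p =>
      let temp := listDict2.getD p.1 []
      if temp.length = 1 then
        result ++ [(PySem.List.pyGetD temp 0 ((0 : Int), (0 : Int))).2]
      else
        (PySem.List.pyRange 0 2 1).foldl
          (fun result i => result ++ [(PySem.List.pyGetD temp i ((0 : Int), (0 : Int))).2]) result)
    []

-- ===== PORT B =====
def solution_alt (genres : List String) (plays : List Int) : List Int :=
  let info : PySem.Dict String (Int × (Int × Int) × Option (Int × Int)) :=
    (PySem.List.enumerate (genres.zip plays) 0).foldl
      (fun d e =>
        d.insert e.2.1
          (match d.get? e.2.1 with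
            | none => (e.2.2, (e.2.2, e.1), none)
            | some (t, b1, b2) =>
              if b1.1 < e.2.2 then (t + e.2.2, (e.2.2, e.1), some b1)
              else if (match b2 with | none => true | some b => decide (b.1 < e.2.2)) then
                (t + e.2.2, b1, some (e.2.2, e.1))
              else (t + e.2.2, b1, b2)))
      PySem.Dict.empty
  (PySem.List.sorted info.items (fun kv => kv.2.1) true).foldl
    (fun result kv =>
      let result := result ++ [kv.2.2.1.2]
      match kv.2.2.2 with
      | some b2 => result ++ [b2.2]
      | none => result)
    []

-- ===== PRECONDITION & SPEC =====
-- Pre_ excludes exactly the inputs where A raises IndexError (plays shorter than genres).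
def Pre_solution (genres : List String) (plays : List Int) : Prop := genres.length ≤ plays.length
instance (genres : List String) (plays : List Int) : Decidable (Pre_solution genres plays) := by unfold Pre_solution; infer_instance
def pvWitness_solution : List String × List Int := (["pop", "classic", "pop", "classic", "pop"], [500, 600, 150, 800, 2500])

def Spec_solution (genres : List String) (plays : List Int) (out : List Int) : Prop := out = solution_alt genres plays
instance (genres : List String) (plays : List Int) (out : List Int) : Decidable (Spec_solution genres plays out) := by unfold Spec_solution; infer_instance

-- ===== CLAIM (what is proved, stated in full; the proofs are below) =====
def Claim_equal_solution : Prop := ∀ (genres : List String) (plays : List Int), Dom_solution genres plays → Pre_solution genres plays → Spec_solution genres plays (solution genres plays)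

-- ===== LEMMAS AND PROOFS =====

-- proof-side state and step of B's per-genre scan, over (play, index) pairs
def pvF (y : Int × Int) (o : Option (Int × (Int × Int) × Option (Int × Int))) :
    Int × (Int × Int) × Option (Int × Int) :=
  match o with
  | none => (y.1, y, none)
  | some (t, b1, b2) =>
    if b1.1 < y.1 then (t + y.1, y, some b1)
    else if (match b2 with | none => true | some b => decide (b.1 < y.1)) then (t + y.1, b1, some y)
    else (t + y.1, b1, b2)

-- the comparator sorted2 _ (·.1) (fun x => -x.2) true uses
def pvBef (x y : Int × Int) : Bool :=
  decide (y.1 < x.1) || (!decide (x.1 < y.1) && decide (-y.2 < -x.2))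

-- first two elements (with a running total) of a sorted per-genre list
def pvTop2 (S : List (Int × Int)) (t : Int) : Option (Int × (Int × Int) × Option (Int × Int)) :=
  match S with
  | [] => none
  | a :: r => some (t, a, r.head?)

theorem pv_sorted2_eq (L : List (Int × Int)) :
    PySem.List.sorted2 L (fun x => x.1) (fun x => -x.2) true =
      L.foldl (fun acc x => PySem.List.insertBy pvBef x acc) [] := rfl

theorem pv_core (L : List (Int × Int)) (hp : L.Pairwise (fun a b => a.2 < b.2)) :
    L.foldl (fun o y => some (pvF y o)) none =
      pvTop2 (PySem.List.sorted2 L (fun x => x.1) (fun x => -x.2) true) ((L.map (fun y => y.1)).sum) := by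
  induction L using List.reverseRecOn with
  | nil => rfl
  | append_singleton L x ih =>
    rw [List.pairwise_append] at hp
    have hx : ∀ y ∈ L, y.2 < x.2 := fun y hy => hp.2.2 y hy x (by simp)
    have hperm : (PySem.List.sorted2 L (fun x => x.1) (fun x => -x.2) true).Perm L :=
      PySem.List.sorted2_perm L _ _ _
    have hbef : ∀ y ∈ PySem.List.sorted2 L (fun x => x.1) (fun x => -x.2) true,
        pvBef x y = decide (y.1 < x.1) := by
      intro y hy
      have hyL : y ∈ L := hperm.mem_iff.mp hy
      have h2 : ¬ (-y.2 < -x.2) := by have := hx y hyL; omega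
      simp [pvBef, h2]
    have hstep : PySem.List.sorted2 (L ++ [x]) (fun x => x.1) (fun x => -x.2) true =
        PySem.List.insertBy pvBef x (PySem.List.sorted2 L (fun x => x.1) (fun x => -x.2) true) := by
      rw [pv_sorted2_eq, pv_sorted2_eq, List.foldl_append, List.foldl_cons, List.foldl_nil]
    rw [List.foldl_append, List.foldl_cons, List.foldl_nil, ih hp.1, hstep]
    have hsum : ((L ++ [x]).map (fun y => y.1)).sum = (L.map (fun y => y.1)).sum + x.1 := by simp
    rw [hsum]
    generalize hSdef : PySem.List.sorted2 L (fun x => x.1) (fun x => -x.2) true = S at hbef hperm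
    match S with
    | [] =>
      have hLnil : L = [] := hperm.symm.eq_nil
      subst hLnil
      simp [pvTop2, pvF, PySem.List.insertBy]
    | y0 :: r =>
      have hb0 : pvBef x y0 = decide (y0.1 < x.1) := hbef y0 (by simp)
      rw [PySem.List.insertBy.eq_2, hb0]
      by_cases h0 : y0.1 < x.1
      · simp [h0, pvTop2, pvF]
      · match r with
        | [] => simp [h0, pvTop2, pvF, PySem.List.insertBy]
        | y1 :: r' =>
          have hb1 : pvBef x y1 = decide (y1.1 < x.1) := hbef y1 (by simp)
          rw [PySem.List.insertBy.eq_2, hb1]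
          by_cases h1 : y1.1 < x.1
          · simp [h0, h1, pvTop2, pvF]
          · simp [h0, h1, pvTop2, pvF]

theorem pv_get?_foldl {ν α : Type} (l : List α) (key : α → String) (F : α → Option ν → ν)
    (d : PySem.Dict String ν) (g : String) :
    (l.foldl (fun d x => d.insert (key x) (F x (d.get? (key x)))) d).get? g =
      (l.filter (fun x => key x == g)).foldl (fun o x => some (F x o)) (d.get? g) := by
  induction l generalizing d with
  | nil => rfl
  | cons x l ih =>
    simp only [List.foldl_cons, List.filter_cons]
    rw [ih]
    by_cases h : key x = g
    · subst h
      simp [PySem.Dict.get?_insert_self]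
    · have hb : (key x == g) = false := by simp [h]
      rw [hb, PySem.Dict.get?_insert_of_ne _ _ (Ne.symm h)]
      simp

theorem pv_getD_foldl_modify_add {α : Type} (l : List α) (key : α → String) (f : α → Int)
    (d : PySem.Dict String Int) (g : String) :
    (l.foldl (fun d x => d.modify (key x) 0 (fun c => c + f x)) d).getD g 0 =
      d.getD g 0 + ((l.filter (fun x => key x == g)).map f).sum := by
  induction l generalizing d with
  | nil => simp
  | cons x l ih =>
    simp only [List.foldl_cons, List.filter_cons]
    rw [ih]
    by_cases h : key x = g
    · subst h
      simp
      ring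
    · have hb : (key x == g) = false := by simp [h]
      rw [hb]
      simp only [Bool.false_eq_true, if_false]
      rw [PySem.Dict.getD_modify]
      simp [Ne.symm h]

theorem pv_get?_foldl_insert_of_not_mem {β : Type} (l : List (String × β)) (F : β → β)
    (d : PySem.Dict String β) (g : String) (h : ∀ p ∈ l, p.1 ≠ g) :
    (l.foldl (fun d' p => d'.insert p.1 (F p.2)) d).get? g = d.get? g := by
  induction l generalizing d with
  | nil => rfl
  | cons p l ih =>
    simp only [List.foldl_cons]
    rw [ih _ (fun q hq => h q (by simp [hq])),
      PySem.Dict.get?_insert_of_ne _ _ (Ne.symm (h p (by simp)))]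

theorem pv_get?_foldl_insert_items {β : Type} (l : List (String × β)) (F : β → β)
    (d : PySem.Dict String β) (g : String) (v : β) (hnd : (l.map (fun p => p.1)).Nodup)
    (hmem : (g, v) ∈ l) :
    (l.foldl (fun d' p => d'.insert p.1 (F p.2)) d).get? g = some (F v) := by
  induction l generalizing d with
  | nil => simp at hmem
  | cons p l ih =>
    simp only [List.map_cons, List.nodup_cons] at hnd
    simp only [List.foldl_cons]
    rcases List.mem_cons.mp hmem with hpv | hpv
    · have hpg : p.1 = g := by rw [← hpv]
      have hrest : ∀ q ∈ l, q.1 ≠ g := by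
        intro q hq hqg
        exact hnd.1 (by rw [hpg, ← hqg]; exact List.mem_map_of_mem hq)
      rw [pv_get?_foldl_insert_of_not_mem _ _ _ _ hrest, ← hpv, PySem.Dict.get?_insert_self]
    · exact ih _ hnd.2 hpv

theorem pv_insertBy_map {α β : Type} (bef : α → α → Bool) (f : β → α) (x : β) (acc : List β) :
    PySem.List.insertBy bef (f x) (acc.map f) =
      (PySem.List.insertBy (fun a b => bef (f a) (f b)) x acc).map f := by
  induction acc with
  | nil => rfl
  | cons y acc ih =>
    simp only [List.map_cons, PySem.List.insertBy.eq_2]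
    by_cases h : bef (f x) (f y)
    · simp [h]
    · simp [h, ih]

theorem pv_sorted_rev_map {α β : Type} (f : β → α) (key : α → Int) (l : List β) :
    PySem.List.sorted (l.map f) key true =
      (PySem.List.sorted l (fun b => key (f b)) true).map f := by
  rw [PySem.List.sorted_rev_eq_foldl_insertBy, PySem.List.sorted_rev_eq_foldl_insertBy]
  have aux : ∀ (l acc : List β),
      (l.map f).foldl (fun a x => PySem.List.insertBy (fun a b => decide (key b < key a)) x a) (acc.map f) =
        (l.foldl (fun a x => PySem.List.insertBy (fun a b => decide (key (f b) < key (f a))) x a) acc).map f := by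
    intro l
    induction l with
    | nil => intro acc; rfl
    | cons x l ih =>
      intro acc
      simp only [List.map_cons, List.foldl_cons]
      rw [pv_insertBy_map (fun a b => decide (key b < key a)) f x acc]
      exact ih _
  exact aux l []

theorem pv_insertBy_congr {α : Type} (b1 b2 : α → α → Bool) (x : α) (ys : List α)
    (h : ∀ y ∈ ys, b1 x y = b2 x y) :
    PySem.List.insertBy b1 x ys = PySem.List.insertBy b2 x ys := by
  induction ys with
  | nil => rfl
  | cons y ys ih =>
    rw [PySem.List.insertBy.eq_2, PySem.List.insertBy.eq_2, h y (by simp),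
      ih (fun z hz => h z (by simp [hz]))]

theorem pv_sorted_rev_congr {α : Type} (l : List α) (k1 k2 : α → Int)
    (h : ∀ a ∈ l, k1 a = k2 a) :
    PySem.List.sorted l k1 true = PySem.List.sorted l k2 true := by
  rw [PySem.List.sorted_rev_eq_foldl_insertBy, PySem.List.sorted_rev_eq_foldl_insertBy]
  have aux : ∀ (l' : List α), (∀ a ∈ l', k1 a = k2 a) → ∀ (acc : List α), (∀ a ∈ acc, k1 a = k2 a) →
      l'.foldl (fun a x => PySem.List.insertBy (fun a b => decide (k1 b < k1 a)) x a) acc =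
        l'.foldl (fun a x => PySem.List.insertBy (fun a b => decide (k2 b < k2 a)) x a) acc := by
    intro l'
    induction l' with
    | nil => intro _ acc _; rfl
    | cons x l' ih =>
      intro hl acc hacc
      simp only [List.foldl_cons]
      rw [pv_insertBy_congr _ (fun a b => decide (k2 b < k2 a)) x acc
        (fun y hy => by rw [hl x (by simp), hacc y hy])]
      exact ih (fun a ha => hl a (by simp [ha])) _
        (fun a ha => by
          rcases (PySem.List.insertBy_mem_iff _ x a acc).mp ha with rfl | ha
          · exact hl a (by simp)
          · exact hacc a ha)
  exact aux l h [] (by simp)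

-- per-genre (play, index) list, total, sorted list, and emitted indices, over the enumerated zip
def pvGrp (E : List (Int × String × Int)) (g : String) : List (Int × Int) :=
  (E.filter (fun e => e.2.1 == g)).map (fun e => (e.2.2, e.1))

def pvTot (E : List (Int × String × Int)) (g : String) : Int :=
  ((E.filter (fun e => e.2.1 == g)).map (fun e => e.2.2)).sum

def pvSG (E : List (Int × String × Int)) (g : String) : List (Int × Int) :=
  PySem.List.sorted2 (pvGrp E g) (fun x => x.1) (fun x => -x.2) true

def pvEm (E : List (Int × String × Int)) (g : String) : List Int :=
  match pvSG E g with
  | [] => []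
  | a :: r => a.2 :: (match r.head? with | some b => [b.2] | none => [])

def pvFE (e : Int × String × Int) (o : Option (Int × (Int × Int) × Option (Int × Int))) :
    Int × (Int × Int) × Option (Int × Int) := pvF (e.2.2, e.1) o

theorem pv_tot_eq (E : List (Int × String × Int)) (g : String) :
    ((pvGrp E g).map (fun y => y.1)).sum = pvTot E g := by
  simp [pvGrp, pvTot, List.map_map]
  rfl

theorem pv_grp_pairwise (E : List (Int × String × Int))
    (hpair : E.Pairwise (fun p q => p.1 < q.1)) (g : String) :
    (pvGrp E g).Pairwise (fun a b => a.2 < b.2) := by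
  exact List.pairwise_map.mpr (hpair.filter _)

theorem pv_info_get? (E : List (Int × String × Int))
    (hpair : E.Pairwise (fun p q => p.1 < q.1)) (k : String) :
    (E.foldl (fun d e => d.insert e.2.1 (pvFE e (d.get? e.2.1))) PySem.Dict.empty).get? k =
      pvTop2 (pvSG E k) (pvTot E k) := by
  have h1 := pv_get?_foldl E (fun e => e.2.1) pvFE PySem.Dict.empty k
  rw [PySem.Dict.get?_empty] at h1
  rw [h1]
  have h2 : (E.filter (fun e => e.2.1 == k)).foldl (fun o e => some (pvFE e o)) none =
      (pvGrp E k).foldl (fun o y => some (pvF y o)) none := by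
    rw [pvGrp, List.foldl_map]
    rfl
  rw [h2, pv_core (pvGrp E k) (pv_grp_pairwise E hpair k), pv_tot_eq, pvSG]

theorem pv_ld_getD (E : List (Int × String × Int)) (k : String) :
    (E.foldl (fun d e => d.modify e.2.1 [] (fun l => l ++ [(e.2.2, e.1)])) PySem.Dict.empty).getD k [] =
      pvGrp E k := by
  have h1 : E.foldl (fun d e => d.modify e.2.1 [] (fun l => l ++ [(e.2.2, e.1)])) PySem.Dict.empty =
      (E.map (fun e => (e.2.1, (e.2.2, e.1)))).foldl
        (fun d p => d.modify p.1 [] (fun l => l ++ [p.2])) PySem.Dict.empty := by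
    rw [List.foldl_map]
  rw [h1, PySem.Dict.getD_foldl_modify_append, PySem.Dict.getD_empty]
  rw [List.filter_map, List.map_map, pvGrp]
  rfl

theorem pv_cd_getD (E : List (Int × String × Int)) (k : String) :
    (E.foldl (fun d e => d.modify e.2.1 0 (fun c => c + e.2.2)) PySem.Dict.empty).getD k 0 =
      pvTot E k := by
  have h1 := pv_getD_foldl_modify_add E (fun e => e.2.1) (fun e => e.2.2) PySem.Dict.empty k
  rw [PySem.Dict.getD_empty] at h1
  rw [h1, zero_add, pvTot]

theorem pv_ld_keys (E : List (Int × String × Int)) :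
    (E.foldl (fun d e => d.modify e.2.1 [] (fun l => l ++ [(e.2.2, e.1)])) PySem.Dict.empty).keys =
      PySem.Set.ofList (E.map (fun e => e.2.1)) := by
  rw [PySem.Dict.keys_foldl_modify_key E (fun e => e.2.1) [] (fun _ e => fun l => l ++ [(e.2.2, e.1)]) PySem.Dict.empty,
    PySem.Dict.keys_empty]
  rfl

theorem pv_cd_keys (E : List (Int × String × Int)) :
    (E.foldl (fun d e => d.modify e.2.1 0 (fun c => c + e.2.2)) PySem.Dict.empty).keys =
      PySem.Set.ofList (E.map (fun e => e.2.1)) := by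
  rw [PySem.Dict.keys_foldl_modify_key E (fun e => e.2.1) 0 (fun _ e => fun c => c + e.2.2) PySem.Dict.empty,
    PySem.Dict.keys_empty]
  rfl

theorem pv_info_keys (E : List (Int × String × Int)) :
    (E.foldl (fun d e => d.insert e.2.1 (pvFE e (d.get? e.2.1))) PySem.Dict.empty).keys =
      PySem.Set.ofList (E.map (fun e => e.2.1)) := by
  rw [PySem.Dict.keys_foldl_insert_key E (fun e => e.2.1) (fun d e => pvFE e (d.get? e.2.1)) PySem.Dict.empty,
    PySem.Dict.keys_empty]
  rfl

-- A's pipeline after the grouping loop, as a function of the two dicts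
def pvAfin (LD : PySem.Dict String (List (Int × Int))) (CD : PySem.Dict String Int) : List Int :=
  (PySem.List.sorted CD.items (fun p => p.2) true).foldl
    (fun result p =>
      let temp := (LD.items.foldl
        (fun d q => d.insert q.1 (PySem.List.sorted2 q.2 (fun x => x.1) (fun x => -x.2) true)) LD).getD p.1 []
      if temp.length = 1 then result ++ [(PySem.List.pyGetD temp 0 ((0 : Int), (0 : Int))).2]
      else (PySem.List.pyRange 0 2 1).foldl
        (fun result i => result ++ [(PySem.List.pyGetD temp i ((0 : Int), (0 : Int))).2]) result)
    []

-- B's pipeline after the scan, as a function of the summary dict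
def pvBfin (INFO : PySem.Dict String (Int × (Int × Int) × Option (Int × Int))) : List Int :=
  (PySem.List.sorted INFO.items (fun kv => kv.2.1) true).foldl
    (fun result kv =>
      let result := result ++ [kv.2.2.1.2]
      match kv.2.2.2 with
      | some b2 => result ++ [b2.2]
      | none => result)
    []

theorem pv_grp_ne (E : List (Int × String × Int)) (k : String)
    (hk : k ∈ PySem.Set.ofList (E.map (fun e => e.2.1))) : pvGrp E k ≠ [] := by
  have hkmem : k ∈ E.map (fun e => e.2.1) := (PySem.Set.mem_ofList _ _).mp hk
  obtain ⟨e, he, hek⟩ := List.mem_map.mp hkmem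
  have hmem : (e.2.2, e.1) ∈ pvGrp E k :=
    List.mem_map_of_mem (List.mem_filter.mpr ⟨he, by simp [hek]⟩)
  exact List.ne_nil_of_mem hmem

theorem pv_sg_ne (E : List (Int × String × Int)) (k : String)
    (hk : k ∈ PySem.Set.ofList (E.map (fun e => e.2.1))) : pvSG E k ≠ [] := by
  intro hnil
  have hperm : (pvSG E k).Perm (pvGrp E k) := PySem.List.sorted2_perm _ _ _ _
  rw [hnil] at hperm
  exact pv_grp_ne E k hk hperm.nil_eq.symm

theorem pv_afin (E : List (Int × String × Int)) :
    pvAfin (E.foldl (fun d e => d.modify e.2.1 [] (fun l => l ++ [(e.2.2, e.1)])) PySem.Dict.empty)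
        (E.foldl (fun d e => d.modify e.2.1 0 (fun c => c + e.2.2)) PySem.Dict.empty) =
      (PySem.List.sorted (PySem.Set.ofList (E.map (fun e => e.2.1))) (pvTot E) true).flatMap (pvEm E) := by
  set LD := E.foldl (fun d e => d.modify e.2.1 [] (fun l => l ++ [(e.2.2, e.1)])) PySem.Dict.empty with hLD
  set CD := E.foldl (fun d e => d.modify e.2.1 0 (fun c => c + e.2.2)) PySem.Dict.empty with hCD
  set K := PySem.Set.ofList (E.map (fun e => e.2.1)) with hK
  have hCDnod : CD.keys.Nodup := by
    rw [hCD, pv_cd_keys]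
    exact PySem.Set.nodup_ofList _
  have hCDitems : CD.items = K.map (fun k => (k, pvTot E k)) := by
    rw [PySem.Dict.items_eq_map_keys CD hCDnod 0, hCD, pv_cd_keys, ← hK]
    exact List.map_congr_left (fun k _ => by rw [pv_cd_getD])
  have hLDnod : LD.keys.Nodup := by
    rw [hLD, pv_ld_keys]
    exact PySem.Set.nodup_ofList _
  have hLD2 : ∀ k ∈ K, (LD.items.foldl
      (fun d q => d.insert q.1 (PySem.List.sorted2 q.2 (fun x => x.1) (fun x => -x.2) true)) LD).getD k [] =
      pvSG E k := by
    intro k hk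
    have hkK : k ∈ LD.keys := by rw [hLD, pv_ld_keys, ← hK]; exact hk
    have hget : LD.get? k = some (pvGrp E k) := by
      cases hg : LD.get? k with
      | none => exact absurd hkK ((PySem.Dict.get?_eq_none_iff_not_mem_keys _ _).mp hg)
      | some v =>
        have h2 := PySem.Dict.getD_of_get?_eq_some LD ([] : List (Int × Int)) hg
        rw [hLD, pv_ld_getD] at h2
        rw [← h2]
    have hitems : (k, pvGrp E k) ∈ LD.items :=
      (PySem.Dict.get?_eq_some_iff_mem_items LD k _ hLDnod).mp hget
    have hnoditems : (LD.items.map (fun p => p.1)).Nodup := hLDnod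
    have hres := pv_get?_foldl_insert_items LD.items
      (fun l => PySem.List.sorted2 l (fun x => x.1) (fun x => -x.2) true) LD k (pvGrp E k)
      hnoditems hitems
    exact PySem.Dict.getD_of_get?_eq_some _ _ hres
  unfold pvAfin
  rw [hCDitems, pv_sorted_rev_map (fun k => (k, pvTot E k)) (fun p => p.2) K]
  have hb : ∀ (acc : List Int), ∀ p ∈ (PySem.List.sorted K (fun b => ((b, pvTot E b) : String × Int).2) true).map
      (fun k => (k, pvTot E k)),
      (fun result p =>
        let temp := (LD.items.foldl
          (fun d q => d.insert q.1 (PySem.List.sorted2 q.2 (fun x => x.1) (fun x => -x.2) true)) LD).getD p.1 []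
        if temp.length = 1 then result ++ [(PySem.List.pyGetD temp 0 ((0 : Int), (0 : Int))).2]
        else (PySem.List.pyRange 0 2 1).foldl
          (fun result i => result ++ [(PySem.List.pyGetD temp i ((0 : Int), (0 : Int))).2]) result) acc p
      = acc ++ pvEm E p.1 := by
    intro acc p hp
    obtain ⟨k, hkKS, rfl⟩ := List.mem_map.mp hp
    have hkK : k ∈ K := (PySem.List.mem_sorted _ _ _ _).mp hkKS
    simp only []
    rw [hLD2 k hkK]
    cases hS : pvSG E k with
    | nil => exact absurd hS (pv_sg_ne E k hkK)
    | cons a r =>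
      cases r with
      | nil =>
        simp only [List.length_cons, List.length_nil, if_true]
        rw [PySem.List.pyGetD_zero_cons]
        simp [pvEm, hS]
      | cons b r' =>
        have hlen : (a :: b :: r').length ≠ 1 := by simp
        rw [if_neg hlen]
        have h01 : PySem.List.pyRange 0 2 1 = [0, 1] := by decide
        rw [h01]
        simp only [List.foldl_cons, List.foldl_nil]
        rw [PySem.List.pyGetD_zero_cons, PySem.List.pyGetD_ofNat' _ 1]
        simp [pvEm, hS, List.append_assoc]
  calc ((PySem.List.sorted K (fun b => ((b, pvTot E b) : String × Int).2) true).map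
        (fun k => (k, pvTot E k))).foldl _ []
      = ((PySem.List.sorted K (fun b => ((b, pvTot E b) : String × Int).2) true).map
        (fun k => (k, pvTot E k))).foldl (fun acc p => acc ++ pvEm E p.1) [] :=
        PySem.List.foldl_congr_mem _ _ _ _ hb
    _ = [] ++ ((PySem.List.sorted K (fun b => ((b, pvTot E b) : String × Int).2) true).map
        (fun k => (k, pvTot E k))).flatMap (fun p => pvEm E p.1) :=
        PySem.List.foldl_append_eq_flatMap _ _ _
    _ = (PySem.List.sorted K (pvTot E) true).flatMap (pvEm E) := by
        rw [List.nil_append, List.flatMap_def, List.map_map, ← List.flatMap_def]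
        rfl

theorem pv_bfin (E : List (Int × String × Int)) (hpair : E.Pairwise (fun p q => p.1 < q.1)) :
    pvBfin (E.foldl (fun d e => d.insert e.2.1 (pvFE e (d.get? e.2.1))) PySem.Dict.empty) =
      (PySem.List.sorted (PySem.Set.ofList (E.map (fun e => e.2.1))) (pvTot E) true).flatMap (pvEm E) := by
  set INFO := E.foldl (fun d e => d.insert e.2.1 (pvFE e (d.get? e.2.1))) PySem.Dict.empty with hI
  set K := PySem.Set.ofList (E.map (fun e => e.2.1)) with hK
  have hnod : INFO.keys.Nodup := by
    rw [hI, pv_info_keys]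
    exact PySem.Set.nodup_ofList _
  have hgetDK : ∀ k ∈ K, ∀ a r, pvSG E k = a :: r →
      INFO.getD k (0, (0, 0), none) = (pvTot E k, a, r.head?) := by
    intro k hk a r hS
    have hg : INFO.get? k = pvTop2 (pvSG E k) (pvTot E k) := by rw [hI]; exact pv_info_get? E hpair k
    rw [hS] at hg
    exact PySem.Dict.getD_of_get?_eq_some _ _ hg
  have hitems : INFO.items = K.map (fun k => (k, INFO.getD k (0, (0, 0), none))) := by
    rw [PySem.Dict.items_eq_map_keys INFO hnod (0, (0, 0), none), hI, pv_info_keys, ← hK]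
  unfold pvBfin
  rw [hitems, pv_sorted_rev_map (fun k => (k, INFO.getD k (0, (0, 0), none))) (fun kv => kv.2.1) K]
  have hcongr : PySem.List.sorted K
      (fun b => ((fun k => (k, INFO.getD k (0, (0, 0), none))) b).2.1) true =
      PySem.List.sorted K (pvTot E) true := by
    refine pv_sorted_rev_congr K _ _ (fun k hk => ?_)
    show (INFO.getD k (0, (0, 0), none)).1 = pvTot E k
    cases hS : pvSG E k with
    | nil => exact absurd hS (pv_sg_ne E k hk)
    | cons a r => rw [hgetDK k hk a r hS]
  rw [hcongr]
  have hb : ∀ (acc : List Int), ∀ p ∈ (PySem.List.sorted K (pvTot E) true).map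
      (fun k => (k, INFO.getD k (0, (0, 0), none))),
      (fun result kv =>
        let result := result ++ [kv.2.2.1.2]
        match kv.2.2.2 with
        | some b2 => result ++ [b2.2]
        | none => result) acc p
      = acc ++ pvEm E p.1 := by
    intro acc p hp
    obtain ⟨k, hkKS, rfl⟩ := List.mem_map.mp hp
    have hkK : k ∈ K := (PySem.List.mem_sorted _ _ _ _).mp hkKS
    cases hS : pvSG E k with
    | nil => exact absurd hS (pv_sg_ne E k hkK)
    | cons a r =>
      simp only [hgetDK k hkK a r hS]
      cases r with
      | nil => simp [pvEm, hS]
      | cons b r' => simp [pvEm, hS]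
  calc ((PySem.List.sorted K (pvTot E) true).map
        (fun k => (k, INFO.getD k (0, (0, 0), none)))).foldl _ []
      = ((PySem.List.sorted K (pvTot E) true).map
        (fun k => (k, INFO.getD k (0, (0, 0), none)))).foldl (fun acc p => acc ++ pvEm E p.1) [] :=
        PySem.List.foldl_congr_mem _ _ _ _ hb
    _ = [] ++ ((PySem.List.sorted K (pvTot E) true).map
        (fun k => (k, INFO.getD k (0, (0, 0), none)))).flatMap (fun p => pvEm E p.1) :=
        PySem.List.foldl_append_eq_flatMap _ _ _
    _ = (PySem.List.sorted K (pvTot E) true).flatMap (pvEm E) := by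
        rw [List.nil_append, List.flatMap_def, List.map_map, ← List.flatMap_def]
        rfl

theorem pv_main (genres : List String) (plays : List Int) (h : genres.length ≤ plays.length) :
    solution genres plays = solution_alt genres plays := by
  have hPlen : (genres.zip plays).length = genres.length := by rw [List.length_zip]; omega
  set E := PySem.List.enumerate (genres.zip plays) 0 with hE
  have hpairE : E.Pairwise (fun p q => p.1 < q.1) := PySem.List.pairwise_lt_enumerate _ 0
  have hdicts :
      (PySem.List.pyRange 0 (genres.length : Int) 1).foldl
        (fun (s : PySem.Dict String (List (Int × Int)) × PySem.Dict String Int) i =>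
          (s.1.modify (PySem.List.pyGetD genres i "") []
              (fun l => l ++ [(PySem.List.pyGetD plays i 0, i)]),
            s.2.modify (PySem.List.pyGetD genres i "") 0
              (fun c => c + PySem.List.pyGetD plays i 0)))
        (PySem.Dict.empty, PySem.Dict.empty)
      = (E.foldl (fun d e => d.modify e.2.1 [] (fun l => l ++ [(e.2.2, e.1)])) PySem.Dict.empty,
          E.foldl (fun d e => d.modify e.2.1 0 (fun c => c + e.2.2)) PySem.Dict.empty) := by
    rw [← PySem.List.foldl_prod_mk
      (f := fun (d : PySem.Dict String (List (Int × Int))) (e : Int × String × Int) =>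
        d.modify e.2.1 [] (fun l => l ++ [(e.2.2, e.1)]))
      (g := fun (d : PySem.Dict String Int) (e : Int × String × Int) =>
        d.modify e.2.1 0 (fun c => c + e.2.2))
      (l := E) (a := PySem.Dict.empty) (b := PySem.Dict.empty)]
    have hEeq : E = (PySem.List.pyRange 0 (genres.length : Int) 1).map
        (fun j => (j, PySem.List.pyGetD (genres.zip plays) j ("", 0))) := by
      rw [hE, PySem.List.enumerate_eq_map_pyRange (genres.zip plays) ("", 0),
        PySem.List.len_eq, hPlen]
    rw [hEeq, List.foldl_map]
    refine PySem.List.foldl_congr_mem _ _ _ _ ?_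
    intro acc j hj
    rw [PySem.List.mem_pyRange_one] at hj
    have hg : PySem.List.pyGetD (genres.zip plays) j ("", 0) = (genres.zip plays)[j.toNat] :=
      PySem.List.pyGetD_eq_getElem _ _ hj.1 (by omega)
    have hgen : PySem.List.pyGetD genres j "" = genres[j.toNat] :=
      PySem.List.pyGetD_eq_getElem _ _ hj.1 hj.2
    have hpl : PySem.List.pyGetD plays j 0 = plays[j.toNat] :=
      PySem.List.pyGetD_eq_getElem _ _ hj.1 (by omega)
    rw [hg, hgen, hpl]
    simp only [List.getElem_zip]
  have hA0 : solution genres plays = pvAfin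
      ((PySem.List.pyRange 0 (genres.length : Int) 1).foldl
        (fun (s : PySem.Dict String (List (Int × Int)) × PySem.Dict String Int) i =>
          (s.1.modify (PySem.List.pyGetD genres i "") []
              (fun l => l ++ [(PySem.List.pyGetD plays i 0, i)]),
            s.2.modify (PySem.List.pyGetD genres i "") 0
              (fun c => c + PySem.List.pyGetD plays i 0)))
        (PySem.Dict.empty, PySem.Dict.empty)).1
      ((PySem.List.pyRange 0 (genres.length : Int) 1).foldl
        (fun (s : PySem.Dict String (List (Int × Int)) × PySem.Dict String Int) i =>
          (s.1.modify (PySem.List.pyGetD genres i "") []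
              (fun l => l ++ [(PySem.List.pyGetD plays i 0, i)]),
            s.2.modify (PySem.List.pyGetD genres i "") 0
              (fun c => c + PySem.List.pyGetD plays i 0)))
        (PySem.Dict.empty, PySem.Dict.empty)).2 := rfl
  have hB0 : solution_alt genres plays =
      pvBfin (E.foldl (fun d e => d.insert e.2.1 (pvFE e (d.get? e.2.1))) PySem.Dict.empty) := rfl
  rw [hA0, hdicts, hB0, pv_afin E, pv_bfin E hpairE]

-- ===== VERDICT (by name: the statement is the Claim_ definition above) =====
theorem solution_spec : Claim_equal_solution := by
  intro genres plays _ hpre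
  exact pv_main genres plays hpre
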